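-- pv_equiv track=rewrite | github.com/AndrewTrieu/LUT-yliopisto | B.Sc. (Tech.) in Software and Systems Engineering/BM40A1500 Data Structures and Algorithms/Assignments/Week 2/changes.py | changes
-- ===== SOURCE A (Python) =====
-- def changes(A):
--     count = 0
--     i = 0
--     while i < len(A):
--         if i == len(A)-1:
--             break
--         else:
--             if A[i+1] == A[i]:
--                 count += 1
--                 i += 2
--             else:
--                 i += 1
--     return count
-- ===== SOURCE B (Python) =====
-- def changes(A):
--     count = 0
--     run = 1
--     for prev, cur in zip(A, A[1:]):
--         if cur == prev:
--             run += 1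
--         else:
--             count += run // 2
--             run = 1
--     return count + run // 2
-- ===== Notes on version B (the rewrite author's own statement) =====
-- stated objective: alternative
-- what changed: B makes one run-length-counting pass over adjacent pairs, adding run//2 at each run boundary and at the end, instead of A's greedy index walk that skips two on each match.
import Mathlib
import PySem

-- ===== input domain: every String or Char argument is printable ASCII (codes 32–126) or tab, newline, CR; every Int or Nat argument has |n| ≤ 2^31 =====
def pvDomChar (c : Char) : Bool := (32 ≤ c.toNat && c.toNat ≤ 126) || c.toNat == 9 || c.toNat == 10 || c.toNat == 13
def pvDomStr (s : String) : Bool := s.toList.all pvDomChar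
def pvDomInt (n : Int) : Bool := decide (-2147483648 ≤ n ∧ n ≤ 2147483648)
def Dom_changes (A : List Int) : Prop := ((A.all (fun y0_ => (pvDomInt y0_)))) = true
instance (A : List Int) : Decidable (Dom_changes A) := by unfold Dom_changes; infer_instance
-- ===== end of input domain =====

-- B is an alternative same-cost algorithm: one run-length pass over adjacent pairs
-- adding run//2 per maximal run, instead of A's greedy skip-by-two index walk.

-- ===== PORT A =====
-- A's while loop over (count, i): the suffix A.drop i is the loop state;
-- 'i == len-1' ≡ one element left, the A[i+1] == A[i] test ≡ the first two of the suffix.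
def changesLoop (count : Int) : List Int → Int
  | [] => count                                   -- i = len: loop exits
  | [_] => count                                  -- i = len-1: break
  | a :: b :: t => if b = a then changesLoop (count + 1) t  -- pair: count += 1, i += 2
                   else changesLoop count (b :: t)          -- no pair: i += 1

def changes (A : List Int) : Int := changesLoop 0 A

-- ===== PORT B =====
-- Source B's for loop over zip(A, A[1:]) with state (count, run)
def altLoop (count : Int) (run : Nat) : List (Int × Int) → Int
  | [] => count + ((run / 2 : Nat) : Int)         -- final 'count + run // 2'
  | (prev, cur) :: t =>
      if cur = prev then altLoop count (run + 1) t
      else altLoop (count + ((run / 2 : Nat) : Int)) 1 t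

def changes_alt (A : List Int) : Int := altLoop 0 1 (A.zip (A.drop 1))

-- ===== PRECONDITION & SPEC =====
def Spec_changes (A : List Int) (out : Int) : Prop := out = changes_alt A
instance (A : List Int) (out : Int) : Decidable (Spec_changes A out) := by unfold Spec_changes; infer_instance

-- ===== CLAIM (what is proved, stated in full; the proofs are below) =====
def Claim_equal_changes : Prop := ∀ (A : List Int), Dom_changes A → Spec_changes A (changes A)

-- ===== LEMMAS AND PROOFS =====

-- bumping the pending run length by 2 is the same as banking one pair now
theorem altLoop_shift (t : List (Int × Int)) : ∀ (count : Int) (run : Nat),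
    altLoop count (run + 2) t = altLoop (count + 1) run t := by
  induction t with
  | nil =>
    intro count run
    simp only [altLoop]
    have : (run + 2) / 2 = run / 2 + 1 := by omega
    rw [this]
    push_cast
    ring
  | cons p t ih =>
    intro count run
    obtain ⟨prev, cur⟩ := p
    simp only [altLoop]
    by_cases h : cur = prev
    · rw [if_pos h, if_pos h]
      exact ih count (run + 1)
    · rw [if_neg h, if_neg h]
      have : (run + 2) / 2 = run / 2 + 1 := by omega
      rw [this]
      push_cast
      ring_nf

-- the two loops agree on every suffix, for every banked count
theorem loop_eq (l : List Int) (count : Int) :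
    changesLoop count l = altLoop count 1 (l.zip (l.drop 1)) := by
  match l with
  | [] => simp [changesLoop, altLoop]
  | [a] => simp [changesLoop, altLoop]
  | a :: b :: t =>
    simp only [List.drop_succ_cons, List.drop_zero, List.zip_cons_cons, changesLoop, altLoop]
    by_cases hab : b = a
    · rw [if_pos hab, if_pos hab]
      have h2 : altLoop count (1 + 1) (List.zip (b :: t) t) = altLoop (count + 1) 0 (List.zip (b :: t) t) :=
        altLoop_shift _ count 0
      rw [h2]
      match t with
      | [] => simp [changesLoop, altLoop]
      | c :: u =>
        simp only [List.zip_cons_cons, altLoop]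
        by_cases hbc : c = b
        · rw [if_pos hbc]
          have := loop_eq (c :: u) (count + 1)
          simpa using this
        · rw [if_neg hbc]
          have := loop_eq (c :: u) (count + 1)
          simpa using this
    · rw [if_neg hab, if_neg hab]
      have := loop_eq (b :: t) count
      simpa using this
termination_by l.length
decreasing_by all_goals simp

-- ===== VERDICT (by name: the statement is the Claim_ definition above) =====
theorem changes_spec : Claim_equal_changes := by
  intro A _
  unfold Spec_changes changes changes_alt
  exact loop_eq A 0
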